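-- pv_equiv track=rewrite | github.com/keongmini/Algorithm_Study | programmers/132265.py | solution
-- ===== SOURCE A (Python) =====
-- from collections import defaultdict
--
-- def solution(topping):
--     result = 0
--
--     left = defaultdict(int)
--     right = defaultdict(int)
--
--     for t in topping:
--         right[t] += 1
--
--     for t in topping:
--         right[t] -= 1
--
--         if right[t] == 0:
--             del right[t]
--
--         left[t] += 1
--
--         if len(left) > len(right):
--             break
--
--         if len(left) == len(right):
--             result += 1
--
--     return result
-- ===== SOURCE B (Python) =====
-- def solution(topping):
--     # prefix[i] = distinct toppings in topping[:i+1]; suffix[i] = distinct in topping[i+1:]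
--     prefix = []
--     seen = set()
--     for t in topping:
--         seen.add(t)
--         prefix.append(len(seen))
--     suffix = []
--     seen = set()
--     for t in reversed(topping):
--         suffix.append(len(seen))
--         seen.add(t)
--     suffix.reverse()
--     return sum(1 for p, s in zip(prefix, suffix) if p == s)
-- ===== Notes on version B (the rewrite author's own statement) =====
-- stated objective: alternative
-- what changed: Replaces A's single stateful sweep over two mutable count-dicts with early break by two independent set passes (forward distinct-prefix counts, backward distinct-suffix counts) and a final zip-count; the break is dropped since left-distinct is non-decreasing and right-distinct non-increasing.
import Mathlib
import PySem

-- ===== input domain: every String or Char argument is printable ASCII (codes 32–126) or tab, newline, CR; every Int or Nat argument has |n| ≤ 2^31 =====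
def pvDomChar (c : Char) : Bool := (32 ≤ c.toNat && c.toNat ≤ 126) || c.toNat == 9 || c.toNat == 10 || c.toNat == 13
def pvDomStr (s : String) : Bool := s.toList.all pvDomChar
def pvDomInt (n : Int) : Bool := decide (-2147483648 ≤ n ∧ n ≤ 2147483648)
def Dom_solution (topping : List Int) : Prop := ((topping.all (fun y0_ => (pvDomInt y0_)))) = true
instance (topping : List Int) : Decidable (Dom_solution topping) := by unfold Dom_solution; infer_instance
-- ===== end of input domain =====

-- B replaces A's single sweep over two mutable count-dicts (with its early break) by two
-- independent set passes (prefix/suffix distinct counts) plus a final zip-count (objective: alternative).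

-- ===== PORT A =====
-- one iteration of A's loop body; the Bool is the "broken out of the loop" flag
def aStep (s : Int × PySem.Dict Int Int × PySem.Dict Int Int × Bool) (t : Int) :
    Int × PySem.Dict Int Int × PySem.Dict Int Int × Bool :=
  match s with
  | (result, left, right, done) =>
    if done then (result, left, right, done)
    else
      let right := right.modify t 0 (· - 1)          -- right[t] -= 1
      let right := if right.getD t 0 = 0 then right.erase t else right  -- if right[t]==0: del right[t]
      let left := left.modify t 0 (· + 1)            -- left[t] += 1
      if left.size > right.size then (result, left, right, true)        -- break
      else if left.size = right.size then (result + 1, left, right, false)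
      else (result, left, right, false)

def solution (topping : List Int) : Int :=
  let right := topping.foldl (fun d t => d.modify t 0 (· + 1)) PySem.Dict.empty
  (topping.foldl aStep (0, PySem.Dict.empty, right, false)).1

-- ===== PORT B =====
def bPrefStep (p : PySem.Set Int × List Int) (t : Int) : PySem.Set Int × List Int :=
  let seen := PySem.Set.add p.1 t
  (seen, p.2 ++ [(seen.length : Int)])

def bSufStep (p : PySem.Set Int × List Int) (t : Int) : PySem.Set Int × List Int :=
  (PySem.Set.add p.1 t, p.2 ++ [(p.1.length : Int)])

def solution_alt (topping : List Int) : Int :=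
  let pref := (topping.foldl bPrefStep (PySem.Set.empty, [])).2
  let suff := ((topping.reverse.foldl bSufStep (PySem.Set.empty, [])).2).reverse
  (pref.zip suff).foldl (fun acc ps => if ps.1 == ps.2 then acc + 1 else acc) 0

-- ===== PRECONDITION & SPEC =====
def Spec_solution (topping : List Int) (out : Int) : Prop := out = solution_alt topping
instance (topping : List Int) (out : Int) : Decidable (Spec_solution topping out) := by unfold Spec_solution; infer_instance

-- ===== CLAIM (what is proved, stated in full; the proofs are below) =====
def Claim_equal_solution : Prop := ∀ (topping : List Int), Dom_solution topping → Spec_solution topping (solution topping)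

-- ===== LEMMAS AND PROOFS =====

-- the common measure: number of distinct elements of a list
def mf (l : List Int) : Nat := l.toFinset.card

lemma len_eq_mf {s l : List Int} (hn : s.Nodup) (hm : ∀ t : Int, t ∈ s ↔ t ∈ l) :
    s.length = mf l := by
  have h : s.toFinset = l.toFinset := by
    ext a; simp [List.mem_toFinset, hm a]
  calc s.length = s.toFinset.card := (List.toFinset_card_of_nodup hn).symm
    _ = l.toFinset.card := by rw [h]

lemma ofList_len (l : List Int) : (PySem.Set.ofList l).length = mf l :=
  len_eq_mf (PySem.Set.nodup_ofList l) (PySem.Set.mem_ofList l)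

lemma mf_mono {l l' : List Int} (h : ∀ t, t ∈ l → t ∈ l') : mf l ≤ mf l' := by
  apply Finset.card_le_card
  intro a ha
  simp only [List.mem_toFinset] at *
  exact h a ha

lemma mf_reverse (l : List Int) : mf l.reverse = mf l := by
  simp [mf]

-- ---- facts about Dict.erase (not provided by the prelude) ----

lemma keys_erase_sublist (d : PySem.Dict Int Int) (k : Int) :
    (d.erase k).keys.Sublist d.keys := by
  simp only [PySem.Dict.erase, PySem.Dict.keys]
  exact List.Sublist.map _ List.filter_sublist

lemma contains_erase (d : PySem.Dict Int Int) (k k' : Int) :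
    (d.erase k).contains k' = (!(k' == k) && d.contains k') := by
  show (d.items.filter _).any _ = _
  rw [List.any_filter]
  rcases eq_or_ne k' k with rfl | hk
  · simp only [beq_self_eq_true, Bool.not_true, Bool.false_and]
    apply List.any_eq_false.2
    intro a _
    simp
  · have hkk : (k' == k) = false := by simpa using hk
    rw [hkk]
    simp only [Bool.not_false, Bool.true_and]
    refine List.any_congr rfl (fun a => ?_)
    cases h2 : (a.1 == k') with
    | false => simp
    | true =>
      have ha : a.1 = k' := by simpa using h2
      simp [ha, hk]

lemma getD_erase_ne (d : PySem.Dict Int Int) {k k' : Int} (h : k' ≠ k) (v : Int) :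
    (d.erase k).getD k' v = d.getD k' v := by
  show ((Option.map _ (List.find? _ (d.items.filter _))).getD v) = _
  rw [List.find?_filter]
  have hfun : (fun (a : Int × Int) => decide (((!(a.1 == k)) = true) ∧ ((a.1 == k') = true)))
      = (fun (p : Int × Int) => p.1 == k') := by
    funext a
    rcases h2 : (a.1 == k') with _ | _
    · simp
    · have ha : a.1 = k' := by simpa using h2
      simp [ha, h]
  rw [hfun]
  rfl

-- ---- the invariant for A's `right` dict: it represents the count multiset of l ----

def RepR (d : PySem.Dict Int Int) (l : List Int) : Prop :=
  d.keys.Nodup ∧ (∀ t : Int, d.getD t 0 = l.count t) ∧ (∀ t : Int, d.contains t = true ↔ t ∈ l)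

lemma size_eq_keys_length (d : PySem.Dict Int Int) : d.size = d.keys.length := by
  simp [PySem.Dict.size, PySem.Dict.keys]

lemma repR_size {d : PySem.Dict Int Int} {l : List Int} (h : RepR d l) : d.size = mf l := by
  rw [size_eq_keys_length]
  exact len_eq_mf h.1 (fun t => by
    rw [← PySem.Dict.contains_iff_mem_keys]
    exact h.2.2 t)

lemma repR_counter (l : List Int) : RepR (PySem.Dict.counter l) l := by
  refine ⟨PySem.Dict.nodup_keys_counter l, fun t => PySem.Dict.getD_counter l t, fun t => ?_⟩
  rw [PySem.Dict.contains_counter]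
  simp

lemma repR_step {d : PySem.Dict Int Int} {t : Int} {rest : List Int}
    (h : RepR d (t :: rest)) :
    RepR (if (d.modify t 0 (· - 1)).getD t 0 = 0 then (d.modify t 0 (· - 1)).erase t
          else d.modify t 0 (· - 1)) rest := by
  obtain ⟨hnd, hcnt, hmem⟩ := h
  have hget : ∀ k : Int, (d.modify t 0 (· - 1)).getD k 0 = rest.count k := by
    intro k
    rw [PySem.Dict.getD_modify]
    by_cases hk : k = t
    · subst hk; rw [hcnt]; simp
    · rw [if_neg hk, hcnt]
      have hne : t ≠ k := fun h => hk h.symm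
      simp [hne]
  have hkeys : (d.modify t 0 (· - 1)).keys.Nodup := by
    rw [PySem.Dict.keys_modify]
    by_cases hc : d.contains t = true
    · rwa [PySem.Dict.keys_insert_of_contains _ _ hc]
    · have hc' : d.contains t = false := by simpa using hc
      rw [PySem.Dict.keys_insert_of_not_contains _ _ hc']
      refine List.Nodup.append hnd (List.nodup_singleton t) ?_
      intro a ha hb
      have hat : a = t := by simpa using hb
      subst hat
      exact hc ((PySem.Dict.contains_iff_mem_keys d a).2 ha)
  have hcont : ∀ k : Int, (d.modify t 0 (· - 1)).contains k = true ↔ k ∈ t :: rest := by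
    intro k
    rw [PySem.Dict.contains_modify]
    by_cases hk : k = t
    · subst hk
      simp [List.mem_cons]
    · have hkt : (k == t) = false := by simpa using hk
      rw [hkt]
      simp only [Bool.false_or]
      rw [hmem k]
  split_ifs with h0
  · -- t no longer present: erase it
    rw [hget t] at h0
    have ht : t ∉ rest := by
      intro hmem'
      have := List.count_pos_iff.2 hmem'
      omega
    refine ⟨(keys_erase_sublist _ t).nodup hkeys, fun k => ?_, fun k => ?_⟩
    · by_cases hk : k = t
      · subst hk
        have hce : ((d.modify k 0 (· - 1)).erase k).contains k = false := by
          rw [contains_erase]; simp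
        rw [PySem.Dict.getD_of_not_contains _ 0 hce]
        have hc0 : rest.count k = 0 := List.count_eq_zero.2 ht
        simp [hc0]
      · rw [getD_erase_ne _ hk, hget]
    · rw [contains_erase]
      by_cases hk : k = t
      · subst hk
        simp [ht]
      · have hkt : (k == t) = false := by simpa using hk
        rw [hkt]
        simp only [Bool.not_false, Bool.true_and]
        rw [hcont k]
        simp [hk]
  · -- t still present in rest
    rw [hget t] at h0
    have ht : t ∈ rest := List.count_pos_iff.1 (by omega)
    refine ⟨hkeys, hget, fun k => ?_⟩
    rw [hcont k]
    by_cases hk : k = t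
    · subst hk; simp [ht]
    · simp [hk]

-- ---- the left dict ----

lemma counter_size (l : List Int) : (PySem.Dict.counter l).size = mf l := by
  rw [size_eq_keys_length, PySem.Dict.keys_counter, ofList_len]

-- ---- A's loop ----

def cntP (pre rest : List Int) : Nat :=
  (List.range rest.length).countP
    (fun i => mf (pre ++ rest.take (i + 1)) == mf (rest.drop (i + 1)))

lemma loop_done (l : List Int) (r : Int) (L R : PySem.Dict Int Int) :
    l.foldl aStep (r, L, R, true) = (r, L, R, true) := by
  induction l with
  | nil => rfl
  | cons t l ih => simpa [aStep] using ih

lemma cntP_zero {pre rest : List Int} {t : Int}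
    (hbrk : mf rest < mf (pre ++ [t])) : cntP pre (t :: rest) = 0 := by
  apply List.countP_eq_zero.2
  intro i hi
  simp only [List.mem_range] at hi
  simp only [beq_iff_eq]
  intro heq
  have h1 : mf (pre ++ [t]) ≤ mf (pre ++ (t :: rest).take (i + 1)) := by
    apply mf_mono
    intro x hx
    simp only [List.mem_append, List.mem_singleton] at hx
    rcases hx with hx | hx
    · simp [hx]
    · subst hx
      simp
  have h2 : mf ((t :: rest).drop (i + 1)) ≤ mf rest := by
    apply mf_mono
    intro x hx
    simp only [List.drop_succ_cons] at hx
    exact List.mem_of_mem_drop hx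
  omega

lemma cntP_cons (pre rest : List Int) (t : Int) :
    cntP pre (t :: rest)
      = (if mf (pre ++ [t]) == mf rest then 1 else 0) + cntP (pre ++ [t]) rest := by
  unfold cntP
  rw [List.length_cons, List.range_succ_eq_map, List.countP_cons, List.countP_map]
  have h0 : (t :: rest).take 1 = [t] := by simp
  have hdrop0 : (t :: rest).drop 1 = rest := by simp
  simp only [h0, hdrop0, Function.comp_def, Nat.succ_eq_add_one]
  have hcongr :
      List.countP (fun i => mf (pre ++ (t :: rest).take (i + 1 + 1)) == mf ((t :: rest).drop (i + 1 + 1)))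
          (List.range rest.length)
        = List.countP (fun i => mf ((pre ++ [t]) ++ rest.take (i + 1)) == mf (rest.drop (i + 1)))
          (List.range rest.length) := by
    apply List.countP_congr
    intro i _
    simp [List.append_assoc]
  rw [hcongr]
  exact Nat.add_comm _ _

lemma loop_main (rest : List Int) : ∀ (pre : List Int) (r : Int) (R : PySem.Dict Int Int),
    RepR R rest →
    (rest.foldl aStep (r, PySem.Dict.counter pre, R, false)).1 = r + (cntP pre rest : Int) := by
  induction rest with
  | nil =>
    intro pre r R _
    simp [cntP]
  | cons t rs ih =>
    intro pre r R hR
    rw [List.foldl_cons]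
    have hrep := repR_step (t := t) hR
    set R'' := (if (R.modify t 0 (· - 1)).getD t 0 = 0
                then (R.modify t 0 (· - 1)).erase t else R.modify t 0 (· - 1)) with hRdef
    have hstep :
        aStep (r, PySem.Dict.counter pre, R, false) t
          = (if mf rs < mf (pre ++ [t]) then (r, PySem.Dict.counter (pre ++ [t]), R'', true)
             else if mf (pre ++ [t]) = mf rs then (r + 1, PySem.Dict.counter (pre ++ [t]), R'', false)
             else (r, PySem.Dict.counter (pre ++ [t]), R'', false)) := by
      simp only [aStep, Bool.false_eq_true, if_false, ← PySem.Dict.counter_append_singleton]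
      rw [← hRdef, repR_size hrep, counter_size]
    rw [hstep]
    split_ifs with hbrk heq
    · rw [loop_done]
      rw [cntP_zero hbrk]
      simp
    · rw [ih (pre ++ [t]) (r + 1) _ hrep, cntP_cons]
      simp only [heq]
      push_cast
      simp
      ring
    · rw [ih (pre ++ [t]) r _ hrep, cntP_cons]
      have hb : (mf (pre ++ [t]) == mf rs) = false := by simpa using heq
      simp [hb]

lemma solution_eq_cnt (topping : List Int) : solution topping = (cntP [] topping : Int) := by
  unfold solution
  rw [← PySem.Dict.counter_eq_foldl]
  have h0 : PySem.Dict.empty = PySem.Dict.counter ([] : List Int) := rfl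
  rw [h0, loop_main topping [] 0 _ (repR_counter topping)]
  simp

-- ---- B's two passes ----

lemma pref_fold (l : List Int) : ∀ (s : PySem.Set Int) (acc : List Int),
    l.foldl bPrefStep (s, acc)
      = (PySem.Set.update s l,
         acc ++ (List.range l.length).map
           (fun i => ((PySem.Set.update s (l.take (i + 1))).length : Int))) := by
  induction l with
  | nil => intro s acc; simp [PySem.Set.update]
  | cons t l ih =>
    intro s acc
    rw [List.foldl_cons]
    show l.foldl bPrefStep (PySem.Set.add s t, acc ++ [((PySem.Set.add s t).length : Int)]) = _
    rw [ih]
    rw [List.length_cons, List.range_succ_eq_map]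
    simp only [Prod.mk.injEq]
    refine ⟨rfl, ?_⟩
    simp only [List.map_cons, List.map_map, Function.comp_def, List.append_assoc,
      List.singleton_append]
    rfl

lemma suf_fold (l : List Int) : ∀ (s : PySem.Set Int) (acc : List Int),
    l.foldl bSufStep (s, acc)
      = (PySem.Set.update s l,
         acc ++ (List.range l.length).map
           (fun i => ((PySem.Set.update s (l.take i)).length : Int))) := by
  induction l with
  | nil => intro s acc; simp [PySem.Set.update]
  | cons t l ih =>
    intro s acc
    rw [List.foldl_cons]
    show l.foldl bSufStep (PySem.Set.add s t, acc ++ [((s).length : Int)]) = _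
    rw [ih]
    rw [List.length_cons, List.range_succ_eq_map]
    simp only [Prod.mk.injEq]
    refine ⟨rfl, ?_⟩
    simp only [List.map_cons, List.map_map, Function.comp_def, List.append_assoc,
      List.singleton_append]
    rfl

lemma update_empty (l : List Int) : PySem.Set.update PySem.Set.empty l = PySem.Set.ofList l :=
  (PySem.Set.ofList_eq_foldl l).symm

lemma reverse_map_range {α : Type} (n : Nat) (g : Nat → α) :
    ((List.range n).map g).reverse = (List.range n).map (fun j => g (n - 1 - j)) := by
  apply List.ext_getElem
  · simp
  · intro i h1 h2
    simp only [List.getElem_reverse, List.getElem_map, List.getElem_range,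
      List.length_map, List.length_range] at *

lemma solution_alt_eq_cnt (topping : List Int) :
    solution_alt topping = (cntP [] topping : Int) := by
  unfold solution_alt
  rw [pref_fold, suf_fold]
  simp only [List.nil_append, List.length_reverse]
  rw [reverse_map_range, List.zip_map']
  rw [PySem.List.foldl_count_if, List.countP_map]
  unfold cntP
  rw [zero_add]
  congr 1
  apply List.countP_congr
  intro j hj
  have hjn : j < topping.length := List.mem_range.1 hj
  simp only [Function.comp_def, update_empty]
  have h1 : topping.reverse.take (topping.length - 1 - j)
      = (topping.drop (j + 1)).reverse := by
    have hidx : topping.length - (topping.length - 1 - j) = j + 1 := by omega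
    rw [List.take_reverse, hidx]
  rw [h1]
  have h2 : (PySem.Set.ofList (topping.drop (j + 1)).reverse).length
      = mf (topping.drop (j + 1)) := by
    rw [ofList_len, mf_reverse]
  have h3 : (PySem.Set.ofList (topping.take (j + 1))).length = mf (topping.take (j + 1)) :=
    ofList_len _
  rw [h2, h3]
  simp [beq_iff_eq, List.nil_append]

-- ===== VERDICT (by name: the statement is the Claim_ definition above) =====
theorem solution_spec : Claim_equal_solution := by
  intro topping _
  unfold Spec_solution
  rw [solution_eq_cnt, solution_alt_eq_cnt]
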